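-- pv_equiv track=rewrite | github.com/DaisioSK/CS5446-Warehouse-Robot | experiments_3ab.py | conflict_timeline
-- ===== SOURCE A (Python) =====
-- from typing import Dict, List, Optional, Tuple
--
-- def conflict_timeline(paths: List[Optional[List[Tuple[int, int]]]]) -> Dict[str, List[int]]:
--     tmax = 0
--     for p in paths:
--         if p:
--             tmax = max(tmax, len(p) - 1)
--     verts = []
--     edges = []
--     for t in range(tmax + 1):
--         # vertex conflicts
--         seen = {}
--         vconf = 0
--         for p in paths:
--             if not p or t >= len(p):
--                 continue
--             cell = p[t]
--             seen.setdefault(cell, 0)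
--             seen[cell] += 1
--         for c in seen.values():
--             if c > 1:
--                 vconf += (c - 1)
--         verts.append(vconf)
--         # edge-swap conflicts at step t (transition t->t+1)
--         econ = 0
--         segs = []
--         for p in paths:
--             if not p or t + 1 >= len(p):
--                 segs.append(None)
--             else:
--                 segs.append((p[t], p[t + 1]))
--         n = len(segs)
--         for i in range(n):
--             if segs[i] is None:
--                 continue
--             u1, v1 = segs[i]
--             for j in range(i + 1, n):
--                 if segs[j] is None:
--                     continue
--                 u2, v2 = segs[j]
--                 if u1 == v2 and v1 == u2:
--                     econ += 1
--         edges.append(econ)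
--     return {"t": list(range(tmax + 1)), "vertex": verts, "edge": edges}
-- ===== SOURCE B (Python) =====
-- from typing import Dict, List, Optional, Tuple
--
-- def conflict_timeline(paths: List[Optional[List[Tuple[int, int]]]]) -> Dict[str, List[int]]:
--     tmax = max([len(p) - 1 for p in paths if p], default=0)
--     ts = list(range(tmax + 1))
--     verts = []
--     edges = []
--     for t in ts:
--         # vertex conflicts: occupied count minus distinct cells
--         cells = [p[t] for p in paths if p and t < len(p)]
--         verts.append(len(cells) - len(set(cells)))
--         # edge-swap conflicts: hash earlier segments, count reversed matches in one pass
--         cnt = {}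
--         e = 0
--         for p in paths:
--             if p and t + 1 < len(p):
--                 u, v = p[t], p[t + 1]
--                 e += cnt.get((v, u), 0)
--                 cnt[(u, v)] = cnt.get((u, v), 0) + 1
--         edges.append(e)
--     return {"t": ts, "vertex": verts, "edge": edges}
-- ===== Notes on version B (the rewrite author's own statement) =====
-- stated objective: faster
-- what changed: Per timestep, B replaces A's O(n^2) pairwise scan for edge-swap conflicts with a single pass that hashes each segment and adds the running count of its reversal, and replaces A's counter-dict vertex tally with 'occupied cells minus distinct cells'; tmax becomes a max over a comprehension.
import Mathlib
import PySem

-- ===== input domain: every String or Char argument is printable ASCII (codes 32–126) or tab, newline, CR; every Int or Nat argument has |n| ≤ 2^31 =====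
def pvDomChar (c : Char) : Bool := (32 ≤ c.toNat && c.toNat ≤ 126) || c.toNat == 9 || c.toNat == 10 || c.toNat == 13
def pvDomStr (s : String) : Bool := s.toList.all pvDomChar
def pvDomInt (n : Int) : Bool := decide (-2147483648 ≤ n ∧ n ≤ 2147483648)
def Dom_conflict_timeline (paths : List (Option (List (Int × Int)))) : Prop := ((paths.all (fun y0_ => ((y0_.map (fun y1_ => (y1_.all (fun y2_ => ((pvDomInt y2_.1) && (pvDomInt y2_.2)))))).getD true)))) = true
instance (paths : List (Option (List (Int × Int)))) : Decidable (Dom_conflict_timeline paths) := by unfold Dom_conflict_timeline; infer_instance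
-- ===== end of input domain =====

-- B replaces A's per-timestep O(n²) pairwise edge-swap scan by a one-pass hash count of
-- reversed segments and the vertex tally by "occupied minus distinct"; objective: faster (O(T·n) vs O(T·n²)).

-- ===== PORT A =====
-- body of A's per-t loop, vertex part: the 'seen' dict fold and the values fold
def pvA_vconf (paths : List (Option (List (Int × Int)))) (t : Int) : Int :=
  let seen : PySem.Dict (Int × Int) Int := paths.foldl (fun seen p =>
    match p with
    | none => seen
    | some l =>
      if l = [] ∨ (l.length : Int) ≤ t then seen
      else
        let cell := PySem.List.pyGet? l t |>.getD (0, 0)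
        (seen.setdefault cell 0).modify cell 0 (· + 1)) PySem.Dict.empty
  seen.values.foldl (fun vconf c => if c > 1 then vconf + (c - 1) else vconf) 0

-- body of A's per-t loop, edge part: build 'segs', then the nested index scan
def pvA_econ (paths : List (Option (List (Int × Int)))) (t : Int) : Int :=
  let segs : List (Option ((Int × Int) × (Int × Int))) := paths.foldl (fun segs p =>
    match p with
    | none => segs ++ [none]
    | some l =>
      if l = [] ∨ (l.length : Int) ≤ t + 1 then segs ++ [none]
      else segs ++ [some ((PySem.List.pyGet? l t).getD (0, 0), (PySem.List.pyGet? l (t + 1)).getD (0, 0))]) []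
  let n := PySem.List.len segs
  (PySem.List.pyRange 0 n).foldl (fun econ i =>
    match PySem.List.pyGetD segs i none with
    | none => econ
    | some (u1, v1) =>
      (PySem.List.pyRange (i + 1) n).foldl (fun econ j =>
        match PySem.List.pyGetD segs j none with
        | none => econ
        | some (u2, v2) => if u1 = v2 ∧ v1 = u2 then econ + 1 else econ) econ) 0

def conflict_timeline (paths : List (Option (List (Int × Int)))) : List (String × List Int) :=
  let tmax : Int := paths.foldl (fun tmax p =>
    match p with
    | none => tmax
    | some l => if l ≠ [] then max tmax ((l.length : Int) - 1) else tmax) 0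
  let ve := (PySem.List.pyRange 0 (tmax + 1)).foldl
    (fun ve t => (ve.1 ++ [pvA_vconf paths t], ve.2 ++ [pvA_econ paths t]))
    (([], []) : List Int × List Int)
  [("t", PySem.List.pyRange 0 (tmax + 1)), ("vertex", ve.1), ("edge", ve.2)]

-- ===== PORT B =====
-- body of B's per-t loop, vertex part: occupied cells minus distinct cells
def pvB_vconf (paths : List (Option (List (Int × Int)))) (t : Int) : Int :=
  let cells := (paths.filter (fun p =>
      match p with
      | none => false
      | some l => decide (l ≠ []) && decide (t < (l.length : Int)))).map
    (fun p => (PySem.List.pyGet? (p.getD []) t).getD (0, 0))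
  (cells.length : Int) - PySem.Set.len (PySem.Set.ofList cells)

-- body of B's per-t loop, edge part: one pass, counting already-seen reversed segments
def pvB_econ (paths : List (Option (List (Int × Int)))) (t : Int) : Int :=
  (paths.foldl (fun ce p =>
    match p with
    | none => ce
    | some l =>
      if l ≠ [] ∧ t + 1 < (l.length : Int) then
        let u := (PySem.List.pyGet? l t).getD (0, 0)
        let v := (PySem.List.pyGet? l (t + 1)).getD (0, 0)
        (ce.1.insert (u, v) (ce.1.getD (u, v) 0 + 1), ce.2 + ce.1.getD (v, u) 0)
      else ce)
    ((PySem.Dict.empty : PySem.Dict ((Int × Int) × (Int × Int)) Int), (0 : Int))).2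

def conflict_timeline_alt (paths : List (Option (List (Int × Int)))) : List (String × List Int) :=
  let tmax : Int := PySem.List.maxD
    ((paths.filter (fun p => match p with | none => false | some l => decide (l ≠ []))).map
      (fun p => ((p.getD []).length : Int) - 1)) (fun x => x) 0
  let ts := PySem.List.pyRange 0 (tmax + 1)
  let ve := ts.foldl
    (fun ve t => (ve.1 ++ [pvB_vconf paths t], ve.2 ++ [pvB_econ paths t]))
    (([], []) : List Int × List Int)
  [("t", ts), ("vertex", ve.1), ("edge", ve.2)]

-- ===== PRECONDITION & SPEC =====
def Spec_conflict_timeline (paths : List (Option (List (Int × Int)))) (out : List (String × List Int)) : Prop := out = conflict_timeline_alt paths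
instance (paths : List (Option (List (Int × Int)))) (out : List (String × List Int)) : Decidable (Spec_conflict_timeline paths out) := by unfold Spec_conflict_timeline; infer_instance

-- ===== CLAIM (what is proved, stated in full; the proofs are below) =====
def Claim_equal_conflict_timeline : Prop := ∀ (paths : List (Option (List (Int × Int)))), Dom_conflict_timeline paths → Spec_conflict_timeline paths (conflict_timeline paths)

-- ===== LEMMAS AND PROOFS =====

theorem pv_setdefault_modify {κ : Type} [BEq κ] [LawfulBEq κ] (d : PySem.Dict κ Int) (c : κ) :
    (d.setdefault c 0).modify c 0 (· + 1) = d.modify c 0 (· + 1) := by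
  by_cases h : d.contains c = true
  · rw [PySem.Dict.setdefault_of_contains d 0 h]
  · rw [PySem.Dict.setdefault_of_not_contains d 0 (by simpa using h)]
    simp only [PySem.Dict.modify, PySem.Dict.getD_insert_self, PySem.Dict.insert_insert_self]
    rw [PySem.Dict.getD_of_not_contains _ _ (by simpa using h)]


-- reference count of swap pairs: for each Some-segment, matches of its reverse later in the list
def pvAW : List (Option ((Int × Int) × (Int × Int))) → Int
  | [] => 0
  | none :: r => pvAW r
  | some s :: r => (r.count (some (s.2, s.1)) : Int) + pvAW r

def pvMix (pre : List ((Int × Int) × (Int × Int))) : List (Option ((Int × Int) × (Int × Int))) → Int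
  | [] => 0
  | none :: r => pvMix pre r
  | some s :: r => (pre.count (s.2, s.1) : Int) + pvMix pre r

theorem pvMix_nil (l : List (Option ((Int × Int) × (Int × Int)))) : pvMix [] l = 0 := by
  induction l with
  | nil => rfl
  | cons x r ih => cases x <;> simp [pvMix, ih]

theorem pvMix_append (pre : List ((Int × Int) × (Int × Int))) (x : (Int × Int) × (Int × Int))
    (l : List (Option ((Int × Int) × (Int × Int)))) :
    pvMix (pre ++ [x]) l = pvMix pre l + (l.count (some (x.2, x.1)) : Int) := by
  induction l with
  | nil => simp [pvMix]
  | cons y r ih =>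
    cases y with
    | none =>
      simp only [pvMix, ih, List.count_cons]
      have : ((none : Option ((Int × Int) × (Int × Int))) == some (x.2, x.1)) = false := by rfl
      simp [this]
    | some s =>
      simp only [pvMix, ih, List.count_append, List.count_cons]
      by_cases h : s = (x.2, x.1)
      · subst h; simp; ring
      · have h2 : (some s == some (x.2, x.1)) = false := by
          simp [h]
        have h3 : ¬ x = (s.2, s.1) := by
          intro hx; apply h; rw [hx]
        simp [h2, h3]
        ring

-- B's one-pass fold over segments computes pvAW
def pvStep (ce : PySem.Dict ((Int × Int) × (Int × Int)) Int × Int)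
    (s : Option ((Int × Int) × (Int × Int))) :
    PySem.Dict ((Int × Int) × (Int × Int)) Int × Int :=
  match s with
  | none => ce
  | some (u, v) => (ce.1.insert (u, v) (ce.1.getD (u, v) 0 + 1), ce.2 + ce.1.getD (v, u) 0)

theorem pvB_fold (l : List (Option ((Int × Int) × (Int × Int)))) :
    ∀ (pre : List ((Int × Int) × (Int × Int))) (e : Int),
    (l.foldl pvStep (PySem.Dict.counter pre, e)).2 = e + pvMix pre l + pvAW l := by
  induction l with
  | nil => intro pre e; simp [pvMix, pvAW]
  | cons x r ih =>
    intro pre e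
    cases x with
    | none => simp only [List.foldl_cons, pvStep, pvMix, pvAW, ih]
    | some s =>
      obtain ⟨u, v⟩ := s
      rw [List.foldl_cons]
      simp only [pvStep]
      rw [show (PySem.Dict.counter pre).insert (u, v) ((PySem.Dict.counter pre).getD (u, v) 0 + 1)
          = PySem.Dict.counter (pre ++ [(u, v)]) from by
        rw [PySem.Dict.counter_append_singleton]; rfl]
      rw [ih]
      simp only [pvMix, pvAW, pvMix_append, PySem.Dict.getD_counter]
      ring

def pvOuterBody (segs : List (Option ((Int × Int) × (Int × Int)))) (econ : Int) (i : Int) : Int :=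
  match PySem.List.pyGetD segs i none with
  | none => econ
  | some (u1, v1) =>
    (PySem.List.pyRange (i + 1) (PySem.List.len segs)).foldl (fun econ j =>
      match PySem.List.pyGetD segs j none with
      | none => econ
      | some (u2, v2) => if u1 = v2 ∧ v1 = u2 then econ + 1 else econ) econ

theorem pvA_drop (segs : List (Option ((Int × Int) × (Int × Int)))) :
    ∀ (suffix : List (Option ((Int × Int) × (Int × Int)))) (k : Nat) (e : Int),
    segs.drop k = suffix →
    (PySem.List.pyRange (k : Int) (PySem.List.len segs)).foldl (pvOuterBody segs) e
      = e + pvAW suffix := by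
  intro suffix
  induction suffix with
  | nil =>
    intro k e h
    have hk : segs.length ≤ k := List.drop_eq_nil_iff.mp h
    rw [PySem.List.pyRange_one_eq_nil (by simp [PySem.List.len]; exact_mod_cast hk)]
    simp [pvAW]
  | cons x r ih =>
    intro k e h
    have hk : k < segs.length := by
      by_contra hc
      rw [List.drop_eq_nil_iff.mpr (by omega)] at h
      simp at h
    have hx : segs[k] = x := by
      have h1 : segs[k]? = some x := by
        have h2 := List.getElem?_drop (xs := segs) (i := k) (j := 0)
        rw [h] at h2
        simpa using h2.symm
      rw [List.getElem?_eq_getElem hk] at h1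
      exact Option.some.inj h1
    have hr : segs.drop (k + 1) = r := by
      have : (segs.drop k).drop 1 = segs.drop (k + 1) := by
        rw [List.drop_drop]
      rw [← this, h, List.drop_one, List.tail_cons]
    rw [PySem.List.pyRange_one_cons (by simp [PySem.List.len]; exact_mod_cast hk)]
    rw [List.foldl_cons]
    have hget : PySem.List.pyGetD segs (k : Int) none = x := by
      rw [PySem.List.pyGetD_eq_getElem _ _ (by positivity) (by exact_mod_cast hk)]
      simpa using hx
    have hcast : ((k : Int) + 1) = ((k + 1 : Nat) : Int) := by push_cast; ring
    cases x with
    | none =>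
      have hb : pvOuterBody segs e (k : Int) = e := by
        unfold pvOuterBody
        rw [hget]
      rw [hb, hcast, ih (k + 1) e hr, pvAW]
    | some s =>
      obtain ⟨u1, v1⟩ := s
      have hb : pvOuterBody segs e (k : Int) = e + (r.count (some (v1, u1)) : Int) := by
        unfold pvOuterBody
        rw [hget]
        dsimp only
        rw [PySem.List.foldl_pyRange_pyGetD segs none
            (fun econ s => match s with
              | none => econ
              | some (u2, v2) => if u1 = v2 ∧ v1 = u2 then econ + 1 else econ) e (by positivity)]
        have ht : ((k : Int) + 1).toNat = k + 1 := by omega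
        rw [ht, hr]
        rw [PySem.List.foldl_congr_mem _ _
            (fun econ s => if s == some (v1, u1) then econ + 1 else econ) e
            (by intro acc y _
                cases y with
                | none => rfl
                | some s2 =>
                  obtain ⟨u2, v2⟩ := s2
                  by_cases h2 : u1 = v2 ∧ v1 = u2
                  · obtain ⟨rfl, rfl⟩ := h2
                    simp
                  · have : ¬ ((u2, v2) = (v1, u1)) := by
                      intro hq
                      apply h2
                      obtain ⟨h3, h4⟩ := Prod.mk.injEq .. ▸ hq
                      exact ⟨by rw [h4], by rw [h3]⟩
                    simp [h2, this])]
        rw [PySem.List.foldl_beq_add_one]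
      rw [hb, hcast, ih (k + 1) _ hr, pvAW]
      ring

def pvSegOf (t : Int) (p : Option (List (Int × Int))) : Option ((Int × Int) × (Int × Int)) :=
  match p with
  | none => none
  | some l =>
    if l = [] ∨ (l.length : Int) ≤ t + 1 then none
    else some ((PySem.List.pyGet? l t).getD (0, 0), (PySem.List.pyGet? l (t + 1)).getD (0, 0))

-- tmax agreement
theorem pv_tmax_eq (paths : List (Option (List (Int × Int)))) :
    paths.foldl (fun tmax p =>
      match p with
      | none => tmax
      | some l => if l ≠ [] then max tmax ((l.length : Int) - 1) else tmax) 0 =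
    PySem.List.maxD
      ((paths.filter (fun p => match p with | none => false | some l => decide (l ≠ []))).map
        (fun p => ((p.getD []).length : Int) - 1)) (fun x => x) 0 := by
  rw [PySem.List.foldl_congr_mem _ _
      (fun tm p => if (match p with | none => false | some l => decide (l ≠ [])) then
        max tm (((p.getD []).length : Int) - 1) else tm) 0
      (by intro acc x _; cases x with
          | none => rfl
          | some l => by_cases h : l = [] <;> simp [h])]
  rw [PySem.List.foldl_if_eq_foldl_filter]
  rw [← List.foldl_map (f := fun p : Option (List (Int × Int)) => ((p.getD []).length : Int) - 1)
      (g := fun tm v => max tm v)]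
  generalize hL : (paths.filter _).map _ = L
  have hnn : ∀ v ∈ L, (0:Int) ≤ v := by
    intro v hv
    rw [← hL] at hv
    obtain ⟨p, hp, rfl⟩ := List.mem_map.mp hv
    have := List.of_mem_filter hp
    cases p with
    | none => simp at this
    | some l =>
      simp only [decide_eq_true_eq] at this
      have : 1 ≤ l.length := List.length_pos_iff.mpr this
      simp only [Option.getD_some]
      omega
  cases L with
  | nil => simp [PySem.List.maxD, PySem.List.max?]
  | cons x tl =>
    rw [PySem.List.maxD, PySem.List.max?_id_cons]
    simp only [Option.getD_some]
    have hx : (0:Int) ≤ x := hnn x (by simp)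
    rw [List.foldl_cons, max_eq_right hx]

-- vertex agreement, per t
theorem pv_vconf_eq (paths : List (Option (List (Int × Int)))) (t : Int) :
    pvA_vconf paths t = pvB_vconf paths t := by
  unfold pvA_vconf pvB_vconf
  -- A's dict loop is Counter(cells)
  have hseen : (paths.foldl (fun seen p =>
      match p with
      | none => seen
      | some l =>
        if l = [] ∨ (l.length : Int) ≤ t then seen
        else
          let cell := PySem.List.pyGet? l t |>.getD (0, 0)
          (seen.setdefault cell 0).modify cell 0 (· + 1)) (PySem.Dict.empty : PySem.Dict (Int × Int) Int)) =
      PySem.Dict.counter ((paths.filter (fun p =>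
        match p with
        | none => false
        | some l => decide (l ≠ []) && decide (t < (l.length : Int)))).map
      (fun p => (PySem.List.pyGet? (p.getD []) t).getD (0, 0))) := by
    rw [PySem.List.foldl_congr_mem _ _
        (fun seen p => if (match p with
          | none => false
          | some l => decide (l ≠ []) && decide (t < (l.length : Int))) then
            (fun (d : PySem.Dict (Int × Int) Int) q =>
              d.modify ((PySem.List.pyGet? (q.getD ([] : List (Int × Int)) ) t).getD (0, 0)) 0 (· + 1)) seen p
          else seen) _
        (by intro acc x _
            cases x with
            | none => rfl
            | some l =>
              by_cases h1 : l = []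
              · simp [h1]
              · by_cases h2 : (l.length : Int) ≤ t
                · simp [h1, h2]
                · simp only [h1, h2, or_self, if_false, ne_eq,
                    not_false_iff, decide_true, Bool.true_and, decide_eq_true (by omega : t < (l.length:Int)), if_true]
                  rw [pv_setdefault_modify]
                  rfl)]
    rw [PySem.List.foldl_if_eq_foldl_filter]
    rw [PySem.Dict.counter_eq_foldl, List.foldl_map]
  dsimp only
  rw [hseen]
  generalize (paths.filter _).map _ = cells
  -- values of a counter
  have hv : (PySem.Dict.counter cells).values =
      (PySem.Set.ofList cells).map (fun k => ((cells.count k : Int))) := by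
    show ((PySem.Dict.counter cells).items).map Prod.snd = _
    rw [PySem.Dict.items_counter, List.map_map]
    rfl
  rw [hv]
  rw [PySem.List.foldl_congr_mem _ _ (fun acc c => acc + (c - 1)) 0
      (by intro acc c hc
          obtain ⟨k, hk, rfl⟩ := List.mem_map.mp hc
          have hk' : k ∈ cells := (PySem.Set.mem_ofList _ _).mp hk
          have : 1 ≤ cells.count k := List.count_pos_iff.mpr hk'
          by_cases h : ((cells.count k : Int)) > 1
          · simp [h]
          · have : cells.count k = 1 := by omega
            simp [this])]
  rw [PySem.List.foldl_add]
  simp only [List.map_map, zero_add, Function.comp_def]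
  have hsum : ((PySem.Set.ofList cells).map (fun k => ((cells.count k : Int)) - 1)).sum
      = ((PySem.Set.ofList cells).map (fun k => ((cells.count k : Int)))).sum
        - ((PySem.Set.ofList cells).length : Int) := by
    induction (PySem.Set.ofList cells) with
    | nil => simp
    | cons x tl ih => simp only [List.map_cons, List.sum_cons, ih, List.length_cons]; push_cast; ring
  rw [hsum]
  have hfin : (PySem.Set.ofList cells).toFinset = cells.toFinset := by
    apply Finset.ext
    intro a
    simp only [List.mem_toFinset]
    exact PySem.Set.mem_ofList _ _
  have h1 : ((PySem.Set.ofList cells).map (fun k => ((cells.count k : Int)))).sum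
      = ((cells.length : Int)) := by
    have h2 : ((PySem.Set.ofList cells).map (fun k => cells.count k)).sum = cells.length := by
      rw [← List.sum_toFinset _ (PySem.Set.nodup_ofList _), hfin]
      have hc : ∀ a : Int × Int, @List.count _ instBEqProd a cells
          = @List.count _ instBEqOfDecidableEq a cells := by
        intro a
        rw [@List.count_eq_countP, @List.count_eq_countP]
        exact List.countP_congr (by intro x _; simp)
      rw [Finset.sum_congr rfl (fun a _ => hc a)]
      exact List.sum_toFinset_count_eq_length cells
    calc ((PySem.Set.ofList cells).map (fun k => ((cells.count k : Int)))).sum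
        = (((PySem.Set.ofList cells).map (fun k => cells.count k)).sum : Int) := by
          rw [show ((PySem.Set.ofList cells).map (fun k => ((cells.count k : Int)))) =
            ((PySem.Set.ofList cells).map (fun k => cells.count k)).map (fun n : Nat => (n : Int)) by
              rw [List.map_map]; rfl]
          exact (Nat.cast_list_sum _).symm
      _ = ((cells.length : Int)) := by rw [h2]
  rw [h1, PySem.Set.len]

-- edge agreement, per t
theorem pv_econ_eq (paths : List (Option (List (Int × Int)))) (t : Int) :
    pvA_econ paths t = pvB_econ paths t := by
  unfold pvA_econ pvB_econ
  dsimp only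
  have hsegs : (paths.foldl (fun segs p =>
      match p with
      | none => segs ++ [none]
      | some l =>
        if l = [] ∨ (l.length : Int) ≤ t + 1 then segs ++ [none]
        else segs ++ [some ((PySem.List.pyGet? l t).getD (0, 0), (PySem.List.pyGet? l (t + 1)).getD (0, 0))])
      ([] : List (Option ((Int × Int) × (Int × Int))))) = paths.map (pvSegOf t) := by
    rw [PySem.List.foldl_congr_mem _ _ (fun segs p => segs ++ [pvSegOf t p]) []
        (by intro acc p _
            cases p with
            | none => rfl
            | some l =>
              by_cases hc : l = [] ∨ (l.length : Int) ≤ t + 1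
              · simp [pvSegOf, hc]
              · simp [pvSegOf, hc])]
    rw [PySem.List.foldl_append_singleton_eq_map]
    simp
  rw [hsegs]
  have hA := pvA_drop (paths.map (pvSegOf t)) (paths.map (pvSegOf t)) 0 0 rfl
  simp only [Nat.cast_zero] at hA
  have hconv : (fun econ i =>
      match PySem.List.pyGetD (paths.map (pvSegOf t)) i none with
      | none => econ
      | some (u1, v1) =>
        (PySem.List.pyRange (i + 1) (PySem.List.len (paths.map (pvSegOf t)))).foldl (fun econ j =>
          match PySem.List.pyGetD (paths.map (pvSegOf t)) j none with
          | none => econ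
          | some (u2, v2) => if u1 = v2 ∧ v1 = u2 then econ + 1 else econ) econ) =
      pvOuterBody (paths.map (pvSegOf t)) := rfl
  rw [hconv, hA, zero_add]
  have hB : (paths.foldl (fun ce p =>
      match p with
      | none => ce
      | some l =>
        if l ≠ [] ∧ t + 1 < (l.length : Int) then
          let u := (PySem.List.pyGet? l t).getD (0, 0)
          let v := (PySem.List.pyGet? l (t + 1)).getD (0, 0)
          (ce.1.insert (u, v) (ce.1.getD (u, v) 0 + 1), ce.2 + ce.1.getD (v, u) 0)
        else ce)
      ((PySem.Dict.empty : PySem.Dict ((Int × Int) × (Int × Int)) Int), (0 : Int))) =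
      (paths.map (pvSegOf t)).foldl pvStep (PySem.Dict.counter [], 0) := by
    rw [List.foldl_map]
    apply PySem.List.foldl_congr_mem
    intro acc p _
    cases p with
    | none => rfl
    | some l =>
      by_cases hc : l = [] ∨ (l.length : Int) ≤ t + 1
      · have hc2 : ¬ (l ≠ [] ∧ t + 1 < (l.length : Int)) := by
          rcases hc with hc | hc
          · simp [hc]
          · intro h2; omega
        simp [pvSegOf, hc, hc2, pvStep]
      · have hc2 : l ≠ [] ∧ t + 1 < (l.length : Int) := by
          push Not at hc
          exact ⟨hc.1, by omega⟩
        have hlt : ¬ ((l.length : Int) ≤ t + 1) := by omega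
        simp [pvSegOf, hc2, hlt, pvStep]
  rw [hB, pvB_fold, pvMix_nil]
  ring

-- ===== VERDICT (by name: the statement is the Claim_ definition above) =====
theorem conflict_timeline_spec : Claim_equal_conflict_timeline := by
  intro paths _
  unfold Spec_conflict_timeline
  simp only [conflict_timeline, conflict_timeline_alt, pv_tmax_eq, pv_vconf_eq, pv_econ_eq]
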